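-- pv_equiv track=rewrite | github.com/zamalali/langchain-code | src/langchain_code/cli_components/todos.py | _coerce_sequential_todos
-- ===== SOURCE A (Python) =====
-- from typing import List, Optional
--
-- def _coerce_sequential_todos(todos: List[dict] | None) -> List[dict]:
--     """Ensure visual progression is strictly sequential."""
--     todos = list(todos or [])
--     blocked = False
--     out: List[dict] = []
--     for item in todos:
--         status = (item.get("status") or "pending").lower().replace("-", "_")
--         if blocked and status in {"in_progress", "completed"}:
--             status = "pending"
--         if status != "completed":
--             blocked = True
--         out.append({**item, "status": status})
--     return out
-- ===== SOURCE B (Python) =====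
-- def _coerce_sequential_todos(todos):
--     """Ensure visual progression is strictly sequential (cutoff-then-map shape)."""
--     items = list(todos or [])
--     norms = [(it.get("status") or "pending").lower().replace("-", "_") for it in items]
--     cutoff = next((i for i, s in enumerate(norms) if s != "completed"), None)
--     out = []
--     for i, (it, s) in enumerate(zip(items, norms)):
--         if cutoff is not None and i > cutoff and s in ("in_progress", "completed"):
--             s = "pending"
--         out.append({**it, "status": s})
--     return out
-- ===== Notes on version B (the rewrite author's own statement) =====
-- stated objective: alternative
-- what changed: Replaces the single pass with a mutable 'blocked' flag by a two-phase find-boundary-then-map shape: normalize all statuses, locate the first non-completed index (cutoff), then demote in_progress/completed to pending only strictly after the cutoff.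
import Mathlib
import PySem

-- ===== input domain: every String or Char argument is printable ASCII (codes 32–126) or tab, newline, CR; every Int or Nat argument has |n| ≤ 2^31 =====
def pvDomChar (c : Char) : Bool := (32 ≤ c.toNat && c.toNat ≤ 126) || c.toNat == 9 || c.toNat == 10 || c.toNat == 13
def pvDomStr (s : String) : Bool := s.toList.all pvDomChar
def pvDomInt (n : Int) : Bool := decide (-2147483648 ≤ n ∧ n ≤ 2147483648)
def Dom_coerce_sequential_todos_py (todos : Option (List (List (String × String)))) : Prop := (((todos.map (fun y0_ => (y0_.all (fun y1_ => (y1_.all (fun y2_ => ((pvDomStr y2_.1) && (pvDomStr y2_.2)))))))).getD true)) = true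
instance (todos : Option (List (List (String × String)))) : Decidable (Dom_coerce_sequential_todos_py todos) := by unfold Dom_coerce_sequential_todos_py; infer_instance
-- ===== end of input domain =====

-- B replaces A's single pass with a mutable 'blocked' flag by a two-phase shape: normalize all
-- statuses, find the first non-completed index (cutoff), then demote only strictly after it.

-- ===== PORT A =====
-- (item.get("status") or "pending").lower().replace("-", "_")  — '' and a missing key both fall to "pending"
def pvNormStatus (item : List (String × String)) : String :=
  let base : String :=
    match (PySem.Dict.ofList item).get? "status" with
    | some t => if t = "" then "pending" else t
    | none => "pending"
  PySem.Str.replace (PySem.Str.lower base) "-" "_"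

-- {**item, "status": s}
def pvRow (item : List (String × String)) (s : String) : List (String × String) :=
  ((PySem.Dict.ofList item).insert "status" s).items

def coerce_sequential_todos_py (todos : Option (List (List (String × String)))) : List (List (String × String)) :=
  let ts := todos.getD []
  (ts.foldl
    (fun (st : Bool × List (List (String × String))) item =>
      let blocked := st.1
      let status0 := pvNormStatus item
      let status := if blocked && (status0 == "in_progress" || status0 == "completed") then "pending" else status0
      let blocked' := if status != "completed" then true else blocked
      (blocked', st.2 ++ [pvRow item status]))
    (false, [])).2

-- ===== PORT B =====
-- next((i for i, s in enumerate(norms) if s != "completed"), None)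
def pvCutoff : List String → Int → Option Int
  | [], _ => none
  | s :: rest, i => if s != "completed" then some i else pvCutoff rest (i + 1)

-- cutoff is not None and i > cutoff
def pvBlockedAt (co : Option Int) (i : Int) : Bool :=
  match co with
  | none => false
  | some c => decide (c < i)

def coerce_sequential_todos_py_alt (todos : Option (List (List (String × String)))) : List (List (String × String)) :=
  let items := todos.getD []
  let norms := items.map pvNormStatus
  let cutoff := pvCutoff norms 0
  (PySem.List.enumerate (items.zip norms)).map (fun p =>
    let s := if pvBlockedAt cutoff p.1 && (p.2.2 == "in_progress" || p.2.2 == "completed") then "pending" else p.2.2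
    pvRow p.2.1 s)

-- ===== PRECONDITION & SPEC =====
def Spec_coerce_sequential_todos_py (todos : Option (List (List (String × String)))) (out : List (List (String × String))) : Prop := out = coerce_sequential_todos_py_alt todos
instance (todos : Option (List (List (String × String)))) (out : List (List (String × String))) : Decidable (Spec_coerce_sequential_todos_py todos out) := by unfold Spec_coerce_sequential_todos_py; infer_instance

-- ===== CLAIM (what is proved, stated in full; the proofs are below) =====
def Claim_equal_coerce_sequential_todos_py : Prop := ∀ (todos : Option (List (List (String × String)))), Dom_coerce_sequential_todos_py todos → Spec_coerce_sequential_todos_py todos (coerce_sequential_todos_py todos)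

-- ===== LEMMAS AND PROOFS =====

-- A's loop as plain structural recursion on the item list, state = the blocked flag
def pvGoA : List (List (String × String)) → Bool → List (List (String × String))
  | [], _ => []
  | item :: rest, blocked =>
    let status0 := pvNormStatus item
    let status := if blocked && (status0 == "in_progress" || status0 == "completed") then "pending" else status0
    let blocked' := if status != "completed" then true else blocked
    pvRow item status :: pvGoA rest blocked'

lemma pvFoldA (items : List (List (String × String))) :
    ∀ (blocked : Bool) (out : List (List (String × String))),
      (items.foldl
        (fun (st : Bool × List (List (String × String))) item =>
          let blocked := st.1
          let status0 := pvNormStatus item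
          let status := if blocked && (status0 == "in_progress" || status0 == "completed") then "pending" else status0
          let blocked' := if status != "completed" then true else blocked
          (blocked', st.2 ++ [pvRow item status]))
        (blocked, out)).2 = out ++ pvGoA items blocked := by
  induction items with
  | nil => simp [pvGoA]
  | cons item rest ih =>
    intro blocked out
    simp only [List.foldl_cons, pvGoA]
    rw [ih]
    simp

-- once blocked, every in_progress/completed is demoted, index-independently
lemma pvGoA_true (items : List (List (String × String))) :
    pvGoA items true =
      items.map (fun it =>
        pvRow it (if pvNormStatus it == "in_progress" || pvNormStatus it == "completed" then "pending" else pvNormStatus it)) := by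
  induction items with
  | nil => rfl
  | cons item rest ih =>
    simp only [pvGoA, Bool.true_and, ite_self, List.map_cons, ih]

lemma pvCutoff_shift (l : List String) : ∀ (i : Int), pvCutoff l (i + 1) = (pvCutoff l i).map (· + 1) := by
  induction l with
  | nil => intro i; rfl
  | cons s rest ih =>
    intro i
    by_cases h : s != "completed"
    · simp [pvCutoff, h]
    · simp [pvCutoff, h, ih]

-- the whole tail after an already-passed cutoff c < i0 is the plain demotion map
lemma pvMapBody_some (xs : List (List (String × String) × String)) :
    ∀ (i0 c : Int), c < i0 →
      (PySem.List.enumerate xs i0).map (fun p =>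
          pvRow p.2.1 (if pvBlockedAt (some c) p.1 && (p.2.2 == "in_progress" || p.2.2 == "completed") then "pending" else p.2.2))
      = xs.map (fun q => pvRow q.1 (if q.2 == "in_progress" || q.2 == "completed" then "pending" else q.2)) := by
  induction xs with
  | nil => intro i0 c _; rfl
  | cons x rest ih =>
    intro i0 c h
    rw [PySem.List.enumerate_cons]
    simp only [List.map_cons, pvBlockedAt]
    rw [List.cons_eq_cons]
    refine ⟨by simp [h], ih (i0 + 1) c (by omega)⟩

-- shifting the start index and the cutoff together changes nothing
lemma pvMapBody_shift (xs : List (List (String × String) × String)) :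
    ∀ (i0 : Int) (co : Option Int),
      (PySem.List.enumerate xs (i0 + 1)).map (fun p =>
          pvRow p.2.1 (if pvBlockedAt (co.map (· + 1)) p.1 && (p.2.2 == "in_progress" || p.2.2 == "completed") then "pending" else p.2.2))
      = (PySem.List.enumerate xs i0).map (fun p =>
          pvRow p.2.1 (if pvBlockedAt co p.1 && (p.2.2 == "in_progress" || p.2.2 == "completed") then "pending" else p.2.2)) := by
  induction xs with
  | nil => intro i0 co; rfl
  | cons x rest ih =>
    intro i0 co
    rw [PySem.List.enumerate_cons, PySem.List.enumerate_cons]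
    simp only [List.map_cons]
    rw [List.cons_eq_cons]
    refine ⟨?_, ih (i0 + 1) co⟩
    cases co with
    | none => rfl
    | some c =>
      simp only [Option.map_some, pvBlockedAt]
      simp only [show (c + 1 < i0 + 1 ↔ c < i0) from by omega]
      rfl

lemma pvCutoff_le (l : List String) : ∀ (i c : Int), pvCutoff l i = some c → i ≤ c := by
  induction l with
  | nil => intro i c h; cases h
  | cons s r ih =>
    intro i c h
    by_cases hs : s != "completed"
    · simp [pvCutoff, hs] at h; omega
    · simp only [pvCutoff, hs, Bool.false_eq_true, if_false] at h
      have := ih (i + 1) c h; omega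

lemma pvMain (items : List (List (String × String))) :
    pvGoA items false =
      (PySem.List.enumerate (items.zip (items.map pvNormStatus))).map (fun p =>
        let s := if pvBlockedAt (pvCutoff (items.map pvNormStatus) 0) p.1 && (p.2.2 == "in_progress" || p.2.2 == "completed") then "pending" else p.2.2
        pvRow p.2.1 s) := by
  induction items with
  | nil => rfl
  | cons item rest ih =>
    simp only [List.map_cons, List.zip_cons_cons]
    rw [PySem.List.enumerate_cons]
    by_cases hc : pvNormStatus item == "completed"
    · -- head completed: cutoff comes from the tail, shifted by one; the head row keeps its status
      have hne : (pvNormStatus item != "completed") = false := by simp [bne, hc]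
      simp only [pvGoA, pvCutoff, hne, Bool.false_and, Bool.false_eq_true, if_false, List.map_cons, zero_add]
      rw [List.cons_eq_cons]
      have hco : pvBlockedAt (pvCutoff (rest.map pvNormStatus) 1) 0 = false := by
        cases hx : pvCutoff (rest.map pvNormStatus) 1 with
        | none => rfl
        | some c =>
          have := pvCutoff_le (rest.map pvNormStatus) 1 c hx
          simp only [pvBlockedAt, decide_eq_false_iff_not, not_lt]; omega
      refine ⟨by simp [hco], ?_⟩
      have hshift := pvMapBody_shift (rest.zip (rest.map pvNormStatus)) 0 (pvCutoff (rest.map pvNormStatus) 0)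
      rw [← pvCutoff_shift] at hshift
      simp only [zero_add] at hshift
      rw [hshift]
      exact ih
    · -- head not completed: cutoff = some 0; everything after index 0 is demoted
      have hne : (pvNormStatus item != "completed") = true := by simp [bne, hc]
      simp only [pvGoA, pvCutoff, hne, if_true, Bool.false_and, Bool.false_eq_true, if_false, List.map_cons, zero_add]
      rw [List.cons_eq_cons]
      refine ⟨by simp [pvBlockedAt], ?_⟩
      rw [pvMapBody_some (rest.zip (rest.map pvNormStatus)) 1 0 (by norm_num), pvGoA_true]
      clear ih
      induction rest with
      | nil => rfl
      | cons y r ihr => simp only [List.map_cons, List.zip_cons_cons, ihr]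

-- ===== VERDICT (by name: the statement is the Claim_ definition above) =====
theorem coerce_sequential_todos_py_spec : Claim_equal_coerce_sequential_todos_py := by
  intro todos _
  show coerce_sequential_todos_py todos = coerce_sequential_todos_py_alt todos
  unfold coerce_sequential_todos_py coerce_sequential_todos_py_alt
  simp only []
  rw [pvFoldA (todos.getD []) false []]
  simpa using pvMain (todos.getD [])
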